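-- pv_equiv track=rewrite | github.com/t753/Hackerrank-solutions | thebombermangame.py | getExploded
-- ===== SOURCE A (Python) =====
-- def outOfBounds(xPos, yPos, rows, cols):
--
-- 	thing = xPos >= 0 and xPos < cols and yPos >= 0 and yPos < rows
-- 	return not thing
--
-- def getExploded(inpt, rows, cols):
--
-- 	arrAlt = [[ord('O') for _x in range(cols)] for _y in range(rows)]
--
-- 	for i in range(rows):
-- 		for j in range(cols):
--
-- 			if inpt[i][j] == 'O':
--
-- 				arrAlt[i][j] = ord('.')
--
-- 				if not (outOfBounds(j-1, i, rows, cols)):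
-- 					arrAlt[i][j-1] = ord('.')
--
-- 				if not (outOfBounds(j+1, i, rows, cols)):
-- 					arrAlt[i][j+1] = ord('.')
--
-- 				if not (outOfBounds(j, i+1, rows, cols)):
-- 					arrAlt[i+1][j] = ord('.')
--
-- 				if not (outOfBounds(j, i-1, rows, cols)):
-- 					arrAlt[i-1][j] = ord('.')
--
-- 	arrAlt_char = [[chr(x) for x in y] for y in arrAlt]
--
-- 	return arrAlt_char
-- ===== SOURCE B (Python) =====
-- def getExploded(inpt, rows, cols):
--     def bombed(i, j):
--         if inpt[i][j] == 'O':
--             return True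
--         for di, dj in ((1, 0), (-1, 0), (0, 1), (0, -1)):
--             r, c = i + di, j + dj
--             if 0 <= r < rows and 0 <= c < cols and inpt[r][c] == 'O':
--                 return True
--         return False
--     return [['.' if bombed(i, j) else 'O' for j in range(cols)] for i in range(rows)]
-- ===== Notes on version B (the rewrite author's own statement) =====
-- stated objective: simpler
-- what changed: Replaced A's scatter (pre-fill an ord-code grid with 'O', then for each bomb overwrite itself and in-bounds neighbours with '.', finally chr-convert) by a direct gather stencil: each output cell is computed in one expression from its own input neighbourhood, with no mutable grid and no ord/chr round-trip.
import Mathlib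
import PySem

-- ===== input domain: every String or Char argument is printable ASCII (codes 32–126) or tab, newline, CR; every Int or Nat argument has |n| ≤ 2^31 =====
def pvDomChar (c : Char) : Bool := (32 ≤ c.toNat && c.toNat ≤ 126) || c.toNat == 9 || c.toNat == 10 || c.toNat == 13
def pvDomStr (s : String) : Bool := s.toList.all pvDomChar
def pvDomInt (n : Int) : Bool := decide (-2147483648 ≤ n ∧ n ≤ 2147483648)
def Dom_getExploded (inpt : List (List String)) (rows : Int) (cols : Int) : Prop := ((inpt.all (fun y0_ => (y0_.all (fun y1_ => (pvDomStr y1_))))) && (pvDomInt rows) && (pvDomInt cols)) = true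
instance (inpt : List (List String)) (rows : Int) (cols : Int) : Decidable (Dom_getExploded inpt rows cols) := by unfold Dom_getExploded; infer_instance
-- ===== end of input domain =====

-- B replaces A's scatter over a mutable pre-filled ord-code grid by a direct gather stencil
-- (each output cell computed from its own input neighbourhood); objective: simpler.

-- ===== PORT A =====

-- inpt[i][j]; exact under Pre_getExploded (both Pythons read only inside the rows×cols rectangle)
def pvCell (inpt : List (List String)) (i j : Int) : String :=
  PySem.List.pyGetD (PySem.List.pyGetD inpt i []) j ""

def pvOutOfBounds (xPos yPos rows cols : Int) : Bool :=
  let thing := decide (xPos ≥ 0) && decide (xPos < cols) && decide (yPos ≥ 0) && decide (yPos < rows)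
  !thing

-- arrAlt[i][j] = v; every call site is guarded so that i, j are in range of the rows×cols grid
def pvSet2 (g : List (List Int)) (i j : Int) (v : Int) : List (List Int) :=
  PySem.List.pySetD g i (PySem.List.pySetD (PySem.List.pyGetD g i []) j v)

-- one of A's guarded neighbour writes: 'if not outOfBounds(col, row, rows, cols): arrAlt[row][col] = ord('.')'
def pvCondSet (rows cols : Int) (g : List (List Int)) (row col : Int) : List (List Int) :=
  if !(pvOutOfBounds col row rows cols) then pvSet2 g row col 46 else g

-- the body of A's double loop for one cell (i = row index, j = column index): the five
-- sequential writes, applied innermost-first exactly in A's order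
def pvWriteA (inpt : List (List String)) (rows cols : Int) (g : List (List Int)) (i j : Int) : List (List Int) :=
  if pvCell inpt i j == "O" then
    pvCondSet rows cols
      (pvCondSet rows cols
        (pvCondSet rows cols
          (pvCondSet rows cols (pvSet2 g i j 46) i (j-1))
          i (j+1))
        (i+1) j)
      (i-1) j
  else g

def getExploded (inpt : List (List String)) (rows : Int) (cols : Int) : List (List String) :=
  let arrAlt0 : List (List Int) :=
    (PySem.List.pyRange 0 rows 1).map (fun _y => (PySem.List.pyRange 0 cols 1).map (fun _x => (79 : Int)))  -- ord 'O'
  let arrAlt :=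
    (PySem.List.pyRange 0 rows 1).foldl (fun g i =>
      (PySem.List.pyRange 0 cols 1).foldl (fun g j => pvWriteA inpt rows cols g i j) g) arrAlt0
  arrAlt.map (fun y => y.map (fun x => String.ofList [Char.ofNat x.toNat]))            -- chr(x)

-- ===== PORT B =====

-- B's helper bombed(i, j): the cell itself or an in-bounds orthogonal neighbour holds 'O'
def pvBombed (inpt : List (List String)) (rows cols i j : Int) : Bool :=
  (pvCell inpt i j == "O") ||
  ([((1:Int),(0:Int)), (-1,0), (0,1), (0,-1)].any (fun d =>
     decide (0 ≤ i + d.1) && decide (i + d.1 < rows) &&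
     decide (0 ≤ j + d.2) && decide (j + d.2 < cols) &&
     (pvCell inpt (i + d.1) (j + d.2) == "O")))

def getExploded_alt (inpt : List (List String)) (rows : Int) (cols : Int) : List (List String) :=
  (PySem.List.pyRange 0 rows 1).map (fun i =>
    (PySem.List.pyRange 0 cols 1).map (fun j =>
      if pvBombed inpt rows cols i j then "." else "O"))

-- ===== PRECONDITION & SPEC =====
-- exactly the inputs on which Python A returns: either the inner loop body never runs (cols ≤ 0),
-- or every read inpt[i][j] with 0 ≤ i < rows, 0 ≤ j < cols is in range (otherwise A raises IndexError)
def Pre_getExploded (inpt : List (List String)) (rows : Int) (cols : Int) : Prop :=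
  cols ≤ 0 ∨ (rows ≤ (inpt.length : Int) ∧ ∀ row ∈ inpt.take rows.toNat, cols ≤ (row.length : Int))
instance (inpt : List (List String)) (rows : Int) (cols : Int) : Decidable (Pre_getExploded inpt rows cols) := by unfold Pre_getExploded; infer_instance

def pvWitness_getExploded : List (List String) × Int × Int := ([["O", "."], [".", "."]], 2, 2)

def Spec_getExploded (inpt : List (List String)) (rows : Int) (cols : Int) (out : List (List String)) : Prop := out = getExploded_alt inpt rows cols
instance (inpt : List (List String)) (rows : Int) (cols : Int) (out : List (List String)) : Decidable (Spec_getExploded inpt rows cols out) := by unfold Spec_getExploded; infer_instance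

-- ===== CLAIM (what is proved, stated in full; the proofs are below) =====
def Claim_equal_getExploded : Prop := ∀ (inpt : List (List String)) (rows : Int) (cols : Int), Dom_getExploded inpt rows cols → Pre_getExploded inpt rows cols → Spec_getExploded inpt rows cols (getExploded inpt rows cols)

-- ===== LEMMAS AND PROOFS =====

-- positional access to the mutable grid (only queried at in-bounds nonnegative coordinates)
def gget (g : List (List Int)) (i j : Int) : Int := (g.getD i.toNat []).getD j.toNat 0

-- the grid has exactly rows × cols shape
def GShape (g : List (List Int)) (rows cols : Int) : Prop :=
  g.length = rows.toNat ∧ ∀ r ∈ g, r.length = cols.toNat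

-- cell (a,b) writes '.' to (i,j)
def touchB (a b i j : Int) : Bool :=
  (i == a && (j == b || j == b - 1 || j == b + 1)) || (j == b && (i == a + 1 || i == a - 1))

theorem getD_set_eq {A : Type} (d : A) (l : List A) (n : Nat) (x : A) (h : n < l.length) :
    (l.set n x).getD n d = x := by
  simp [List.getD_eq_getElem?_getD, h]

theorem getD_set_ne {A : Type} (d : A) (l : List A) (m n : Nat) (x : A) (h : m ≠ n) :
    (l.set m x).getD n d = l.getD n d := by
  simp [List.getD_eq_getElem?_getD, h]

theorem gget_nat (g : List (List Int)) (n m : Nat) (h1 : n < g.length)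
    (h2 : m < (g[n]'h1).length) :
    gget g (n : Int) (m : Int) = (g[n]'h1)[m]'h2 := by
  unfold gget
  rw [Int.toNat_natCast, Int.toNat_natCast, List.getD_eq_getElem _ _ h1,
      List.getD_eq_getElem _ _ h2]

theorem gshape_pvSet2 {g : List (List Int)} {rows cols : Int} (hs : GShape g rows cols)
    (a b : Int) (ha : 0 ≤ a) (ha2 : a < rows) (v : Int) :
    GShape (pvSet2 g a b v) rows cols := by
  obtain ⟨hl, hr⟩ := hs
  have halen : a.toNat < g.length := by omega
  have hgA : PySem.List.pyGetD g a [] = g[a.toNat]'halen :=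
    PySem.List.pyGetD_eq_getElem g [] ha (by omega)
  constructor
  · simpa [pvSet2, PySem.List.pySetD_of_nonneg _ _ ha] using hl
  · intro r hrm
    simp only [pvSet2, PySem.List.pySetD_of_nonneg _ _ ha] at hrm
    rcases List.mem_or_eq_of_mem_set hrm with h | h
    · exact hr r h
    · subst h
      rw [PySem.List.length_pySetD, hgA]
      exact hr _ (List.getElem_mem _)

theorem gget_pvSet2 {g : List (List Int)} {rows cols : Int} (hs : GShape g rows cols)
    (a b i j v : Int) (ha : 0 ≤ a) (ha2 : a < rows) (hb : 0 ≤ b) (hb2 : b < cols)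
    (hi : 0 ≤ i) (hi2 : i < rows) (hj : 0 ≤ j) (hj2 : j < cols) :
    gget (pvSet2 g a b v) i j = if i = a ∧ j = b then v else gget g i j := by
  obtain ⟨hl, hr⟩ := hs
  have halen : a.toNat < g.length := by omega
  have hgA : PySem.List.pyGetD g a [] = g[a.toNat]'halen :=
    PySem.List.pyGetD_eq_getElem g [] ha (by omega)
  have hrlenA : (g[a.toNat]'halen).length = cols.toNat := hr _ (List.getElem_mem _)
  have e1 : pvSet2 g a b v = g.set a.toNat ((g[a.toNat]'halen).set b.toNat v) := by
    rw [pvSet2, hgA, PySem.List.pySetD_of_nonneg _ _ ha, PySem.List.pySetD_of_nonneg _ _ hb]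
  unfold gget
  rw [e1]
  by_cases hia : i = a
  · subst hia
    rw [getD_set_eq [] g i.toNat _ halen]
    by_cases hjb : j = b
    · subst hjb
      rw [getD_set_eq 0 _ j.toNat v (by rw [hrlenA]; omega), if_pos ⟨rfl, rfl⟩]
    · rw [getD_set_ne 0 _ b.toNat j.toNat v (by omega), if_neg (by tauto),
          List.getD_eq_getElem g [] halen]
  · rw [getD_set_ne [] g a.toNat i.toNat _ (by omega), if_neg (by tauto)]

theorem pvOutOfBounds_false {x y rows cols : Int} :
    (!(pvOutOfBounds x y rows cols)) = true ↔ (0 ≤ x ∧ x < cols ∧ 0 ≤ y ∧ y < rows) := by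
  simp [pvOutOfBounds]; omega

theorem gshape_pvCondSet {g : List (List Int)} {rows cols : Int} (hs : GShape g rows cols)
    (r c : Int) : GShape (pvCondSet rows cols g r c) rows cols := by
  unfold pvCondSet
  split
  · rename_i h
    rw [pvOutOfBounds_false] at h
    exact gshape_pvSet2 hs r c (by omega) (by omega) 46
  · exact hs

theorem gget_pvCondSet {g : List (List Int)} {rows cols : Int} (hs : GShape g rows cols)
    (r c i j : Int) (hi : 0 ≤ i) (hi2 : i < rows) (hj : 0 ≤ j) (hj2 : j < cols) :
    gget (pvCondSet rows cols g r c) i j = if i = r ∧ j = c then 46 else gget g i j := by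
  unfold pvCondSet
  by_cases h : (!(pvOutOfBounds c r rows cols)) = true
  · rw [if_pos h]
    rw [pvOutOfBounds_false] at h
    exact gget_pvSet2 hs r c i j 46 (by omega) (by omega) (by omega) (by omega) hi hi2 hj hj2
  · rw [if_neg h, if_neg]
    rintro ⟨rfl, rfl⟩
    rw [pvOutOfBounds_false] at h
    exact h ⟨hj, hj2, hi, hi2⟩

theorem gshape_pvWriteA {inpt : List (List String)} {g : List (List Int)} {rows cols : Int}
    (hs : GShape g rows cols) (a b : Int)
    (ha : 0 ≤ a) (ha2 : a < rows) (_hb : 0 ≤ b) (_hb2 : b < cols) :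
    GShape (pvWriteA inpt rows cols g a b) rows cols := by
  unfold pvWriteA
  split
  · exact gshape_pvCondSet (gshape_pvCondSet (gshape_pvCondSet (gshape_pvCondSet
      (gshape_pvSet2 hs a b ha ha2 46) a (b-1)) a (b+1)) (a+1) b) (a-1) b
  · exact hs

theorem gget_pvWriteA {inpt : List (List String)} {g : List (List Int)} {rows cols : Int}
    (hs : GShape g rows cols) (a b i j : Int)
    (ha : 0 ≤ a) (ha2 : a < rows) (hb : 0 ≤ b) (hb2 : b < cols)
    (hi : 0 ≤ i) (hi2 : i < rows) (hj : 0 ≤ j) (hj2 : j < cols) :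
    gget (pvWriteA inpt rows cols g a b) i j =
      if (pvCell inpt a b == "O") && touchB a b i j then 46 else gget g i j := by
  unfold pvWriteA
  by_cases hO : (pvCell inpt a b == "O") = true
  · rw [if_pos hO]
    have s1 := gshape_pvSet2 hs a b ha ha2 46
    have s2 := gshape_pvCondSet s1 a (b-1)
    have s3 := gshape_pvCondSet s2 a (b+1)
    have s4 := gshape_pvCondSet s3 (a+1) b
    rw [gget_pvCondSet s4 (a-1) b i j hi hi2 hj hj2,
        gget_pvCondSet s3 (a+1) b i j hi hi2 hj hj2,
        gget_pvCondSet s2 a (b+1) i j hi hi2 hj hj2,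
        gget_pvCondSet s1 a (b-1) i j hi hi2 hj hj2,
        gget_pvSet2 hs a b i j 46 ha ha2 hb hb2 hi hi2 hj hj2]
    simp only [hO, Bool.true_and]
    split_ifs <;> first
      | (simp_all [touchB]; omega)
      | simp_all [touchB]
  · rw [if_neg hO]
    simp only [Bool.and_eq_true] at *
    simp [hO]

theorem foldl_write {inpt : List (List String)} {rows cols : Int} (L : List (Int × Int)) :
    ∀ g, GShape g rows cols → (∀ p ∈ L, 0 ≤ p.1 ∧ p.1 < rows ∧ 0 ≤ p.2 ∧ p.2 < cols) →
      GShape (L.foldl (fun g p => pvWriteA inpt rows cols g p.1 p.2) g) rows cols ∧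
      ∀ i j, 0 ≤ i → i < rows → 0 ≤ j → j < cols →
        gget (L.foldl (fun g p => pvWriteA inpt rows cols g p.1 p.2) g) i j =
          if L.any (fun p => (pvCell inpt p.1 p.2 == "O") && touchB p.1 p.2 i j) then 46
          else gget g i j := by
  induction L with
  | nil => intro g hs _; exact ⟨hs, by simp⟩
  | cons p L ih =>
    intro g hs hL
    obtain ⟨hp1, hp2, hp3, hp4⟩ := hL p (List.mem_cons_self)
    have hs' : GShape (pvWriteA inpt rows cols g p.1 p.2) rows cols :=
      gshape_pvWriteA hs p.1 p.2 hp1 hp2 hp3 hp4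
    obtain ⟨ihs, ihv⟩ := ih (pvWriteA inpt rows cols g p.1 p.2) hs'
      (fun q hq => hL q (List.mem_cons_of_mem _ hq))
    refine ⟨by simpa using ihs, ?_⟩
    intro i j hi hi2 hj hj2
    rw [List.foldl_cons, ihv i j hi hi2 hj hj2,
        gget_pvWriteA hs p.1 p.2 i j hp1 hp2 hp3 hp4 hi hi2 hj hj2]
    simp only [List.any_cons]
    by_cases h1 : (L.any (fun p => (pvCell inpt p.1 p.2 == "O") && touchB p.1 p.2 i j)) = true
    · simp [h1]
    · by_cases h2 : ((pvCell inpt p.1 p.2 == "O") && touchB p.1 p.2 i j) = true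
      · simp [h1, h2]
      · simp [h1, h2]

theorem foldl_foldl_flat {inpt : List (List String)} {rows cols : Int} (ys : List Int) :
    ∀ (xs : List Int) (g : List (List Int)),
      xs.foldl (fun g i => ys.foldl (fun g j => pvWriteA inpt rows cols g i j) g) g
        = (xs.flatMap fun i => ys.map fun j => (i, j)).foldl
            (fun g p => pvWriteA inpt rows cols g p.1 p.2) g := by
  intro xs
  induction xs with
  | nil => intro g; simp
  | cons x xs ih =>
    intro g
    simp only [List.foldl_cons, List.flatMap_cons, List.foldl_append, List.foldl_map]
    exact ih _

theorem mem_flat {rows cols : Int} (p : Int × Int) :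
    p ∈ ((PySem.List.pyRange 0 rows 1).flatMap fun i => (PySem.List.pyRange 0 cols 1).map fun j => (i, j))
      ↔ (0 ≤ p.1 ∧ p.1 < rows ∧ 0 ≤ p.2 ∧ p.2 < cols) := by
  rcases p with ⟨a, b⟩
  simp only [List.mem_flatMap, List.mem_map, PySem.List.mem_pyRange_one, Prod.mk.injEq]
  constructor
  · rintro ⟨x, ⟨hx1, hx2⟩, y, ⟨hy1, hy2⟩, rfl, rfl⟩
    exact ⟨hx1, hx2, hy1, hy2⟩
  · rintro ⟨h1, h2, h3, h4⟩
    exact ⟨a, ⟨h1, h2⟩, b, ⟨h3, h4⟩, rfl, rfl⟩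

theorem touchB_iff {a b i j : Int} :
    touchB a b i j = true ↔
      ((i = a ∧ (j = b ∨ j = b - 1 ∨ j = b + 1)) ∨ (j = b ∧ (i = a + 1 ∨ i = a - 1))) := by
  simp only [touchB, Bool.or_eq_true, Bool.and_eq_true, beq_iff_eq]
  tauto

theorem bombed_iff {inpt : List (List String)} {rows cols i j : Int}
    (hi : 0 ≤ i) (hi2 : i < rows) (hj : 0 ≤ j) (hj2 : j < cols) :
    pvBombed inpt rows cols i j = true ↔
      ∃ p : Int × Int, (0 ≤ p.1 ∧ p.1 < rows ∧ 0 ≤ p.2 ∧ p.2 < cols) ∧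
        pvCell inpt p.1 p.2 = "O" ∧ touchB p.1 p.2 i j = true := by
  have hiff : ∀ r c : Int,
      (decide (0 ≤ r) && decide (r < rows) && decide (0 ≤ c) && decide (c < cols) &&
        (pvCell inpt r c == "O")) = true
        ↔ (0 ≤ r ∧ r < rows ∧ 0 ≤ c ∧ c < cols ∧ pvCell inpt r c = "O") := by
    intro r c
    simp [Bool.and_eq_true, decide_eq_true_eq, beq_iff_eq, and_assoc]
  simp only [pvBombed, List.any_cons, List.any_nil, Bool.or_false, Bool.or_eq_true, hiff,
    beq_iff_eq, add_zero]
  constructor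
  · rintro (h | ⟨h1, h2, h3, h4, h5⟩ | ⟨h1, h2, h3, h4, h5⟩ | ⟨h1, h2, h3, h4, h5⟩ |
      ⟨h1, h2, h3, h4, h5⟩)
    · exact ⟨(i, j), ⟨hi, hi2, hj, hj2⟩, h,
        by rw [touchB_iff]; exact Or.inl ⟨rfl, Or.inl rfl⟩⟩
    · exact ⟨(i + 1, j), ⟨h1, h2, h3, h4⟩, h5,
        by rw [touchB_iff]; exact Or.inr ⟨rfl, Or.inr (by omega)⟩⟩
    · exact ⟨(i + -1, j), ⟨h1, h2, h3, h4⟩, h5,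
        by rw [touchB_iff]; exact Or.inr ⟨rfl, Or.inl (by omega)⟩⟩
    · exact ⟨(i, j + 1), ⟨h1, h2, h3, h4⟩, h5,
        by rw [touchB_iff]; exact Or.inl ⟨rfl, Or.inr (Or.inl (by omega))⟩⟩
    · exact ⟨(i, j + -1), ⟨h1, h2, h3, h4⟩, h5,
        by rw [touchB_iff]; exact Or.inl ⟨rfl, Or.inr (Or.inr (by omega))⟩⟩
  · rintro ⟨⟨a, b⟩, ⟨h1, h2, h3, h4⟩, hO, ht⟩
    rw [touchB_iff] at ht
    simp only at h1 h2 h3 h4 hO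
    rcases ht with ⟨rfl, rfl | hjb | hjb⟩ | ⟨rfl, hia | hia⟩
    · exact Or.inl hO
    · have : b = j + 1 := by omega
      subst this
      exact Or.inr (Or.inr (Or.inr (Or.inl ⟨by omega, by omega, by omega, by omega, hO⟩)))
    · have : b = j + -1 := by omega
      subst this
      exact Or.inr (Or.inr (Or.inr (Or.inr ⟨by omega, by omega, by omega, by omega, hO⟩)))
    · have : a = i + -1 := by omega
      subst this
      exact Or.inr (Or.inr (Or.inl ⟨by omega, by omega, by omega, by omega, hO⟩))
    · have : a = i + 1 := by omega
      subst this
      exact Or.inr (Or.inl ⟨by omega, by omega, by omega, by omega, hO⟩)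

theorem gshape_init {rows cols : Int} :
    GShape ((PySem.List.pyRange 0 rows 1).map
      (fun _y => (PySem.List.pyRange 0 cols 1).map (fun _x => (79 : Int)))) rows cols := by
  constructor
  · simp [PySem.List.length_pyRange_one]
  · intro r hr
    simp only [List.mem_map] at hr
    obtain ⟨x, _, rfl⟩ := hr
    simp [PySem.List.length_pyRange_one]

theorem gget_init {rows cols i j : Int}
    (hi : 0 ≤ i) (hi2 : i < rows) (hj : 0 ≤ j) (hj2 : j < cols) :
    gget ((PySem.List.pyRange 0 rows 1).map
      (fun _y => (PySem.List.pyRange 0 cols 1).map (fun _x => (79 : Int)))) i j = 79 := by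
  unfold gget
  rw [List.getD_eq_getElem _ _
    (show i.toNat < ((PySem.List.pyRange 0 rows 1).map
      (fun _y => (PySem.List.pyRange 0 cols 1).map (fun _x => (79 : Int)))).length from by
        rw [List.length_map, PySem.List.length_pyRange_one]; omega)]
  simp only [List.getElem_map]
  rw [List.getD_eq_getElem _ _
    (show j.toNat < ((PySem.List.pyRange 0 cols 1).map (fun _x => (79 : Int))).length from by
        rw [List.length_map, PySem.List.length_pyRange_one]; omega)]
  simp only [List.getElem_map]

theorem main_eq (inpt : List (List String)) (rows cols : Int) :
    getExploded inpt rows cols = getExploded_alt inpt rows cols := by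
  show ((PySem.List.pyRange 0 rows 1).foldl (fun g i =>
      (PySem.List.pyRange 0 cols 1).foldl (fun g j => pvWriteA inpt rows cols g i j) g)
      ((PySem.List.pyRange 0 rows 1).map
        (fun _y => (PySem.List.pyRange 0 cols 1).map (fun _x => (79 : Int))))).map
      (fun y => y.map (fun x => String.ofList [Char.ofNat x.toNat]))
    = (PySem.List.pyRange 0 rows 1).map (fun i =>
        (PySem.List.pyRange 0 cols 1).map (fun j =>
          if pvBombed inpt rows cols i j then "." else "O"))
  rw [foldl_foldl_flat]
  have h0 := gshape_init (rows := rows) (cols := cols)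
  have hmem : ∀ p ∈ ((PySem.List.pyRange 0 rows 1).flatMap
      fun i => (PySem.List.pyRange 0 cols 1).map fun j => (i, j)),
      0 ≤ p.1 ∧ p.1 < rows ∧ 0 ≤ p.2 ∧ p.2 < cols := fun p hp => (mem_flat p).mp hp
  obtain ⟨hshape, hval⟩ := foldl_write (inpt := inpt)
    ((PySem.List.pyRange 0 rows 1).flatMap fun i => (PySem.List.pyRange 0 cols 1).map fun j => (i, j))
    _ h0 hmem
  set G := ((PySem.List.pyRange 0 rows 1).flatMap
      fun i => (PySem.List.pyRange 0 cols 1).map fun j => (i, j)).foldl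
      (fun g p => pvWriteA inpt rows cols g p.1 p.2)
      ((PySem.List.pyRange 0 rows 1).map
        (fun _y => (PySem.List.pyRange 0 cols 1).map (fun _x => (79 : Int)))) with hG
  obtain ⟨hGlen, hGrow⟩ := hshape
  apply List.ext_getElem
  · simp [hGlen, PySem.List.length_pyRange_one]
  · intro n h1 h2
    have hGn : n < G.length := by rw [List.length_map] at h1; exact h1
    have hn : n < rows.toNat := by omega
    have hnI2 : (n : Int) < rows := by omega
    have hrowlen : (G[n]'hGn).length = cols.toNat := hGrow _ (List.getElem_mem _)
    simp only [List.getElem_map, PySem.List.getElem_pyRange_one]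
    apply List.ext_getElem
    · simp [hrowlen, PySem.List.length_pyRange_one]
    · intro m m1 m2
      have hGm : m < (G[n]'hGn).length := by rw [List.length_map] at m1; exact m1
      have hm : m < cols.toNat := by omega
      have hmI2 : (m : Int) < cols := by omega
      simp only [List.getElem_map, PySem.List.getElem_pyRange_one]
      have hvnm := hval (n : Int) (m : Int) (by omega) hnI2 (by omega) hmI2
      rw [gget_nat G n m hGn hGm] at hvnm
      rw [hvnm, gget_init (by omega) hnI2 (by omega) hmI2]
      have hany : (((PySem.List.pyRange 0 rows 1).flatMap
          fun i => (PySem.List.pyRange 0 cols 1).map fun j => (i, j)).any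
            (fun p => (pvCell inpt p.1 p.2 == "O") && touchB p.1 p.2 (n : Int) (m : Int)))
          = pvBombed inpt rows cols (n : Int) (m : Int) := by
        rw [Bool.eq_iff_iff, List.any_eq_true,
            bombed_iff (by omega) hnI2 (by omega) hmI2]
        constructor
        · rintro ⟨p, hp, hc⟩
          exact ⟨p, (mem_flat p).mp hp, by simpa using hc⟩
        · rintro ⟨p, hp, hc⟩
          exact ⟨p, (mem_flat p).mpr hp, by simpa using hc⟩
      rw [hany]
      simp only [zero_add]
      by_cases hb : pvBombed inpt rows cols (n : Int) (m : Int) = true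
      · simp only [hb, if_pos]
        decide
      · simp only [Bool.not_eq_true] at hb
        simp only [hb]
        decide

-- ===== VERDICT (by name: the statement is the Claim_ definition above) =====
theorem getExploded_spec : Claim_equal_getExploded := by
  intro inpt rows cols _ _
  unfold Spec_getExploded
  exact main_eq inpt rows cols
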